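-- pv_equiv track=rewrite | github.com/elvis-gene/coding-practice | binarysearch.com/MedianMinimization.py | solve
-- ===== SOURCE A (Python) =====
-- def solve(nums):
--
--     nums.sort()
--     list_a = []
--     list_b = []
--
--     for i in range(len(nums)):
--         if i % 2 == 0:
--             list_a.append(nums[i])
--         else:
--             list_b.append(nums[i])
--
--     median_a_index = len(list_a)//2
--     median_b_index = len(list_b)//2
--
--     return abs(list_a[median_a_index] - list_b[median_b_index])
-- ===== SOURCE B (Python) =====
-- def solve(nums):
--     # Same return value as the original; like the original, sorts nums in place.
--     nums.sort()
--     n = len(nums)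
--     i_a = 2 * (((n + 1) // 2) // 2)      # position of even-half median in the sorted list
--     i_b = 2 * ((n // 2) // 2) + 1        # position of odd-half median in the sorted list
--     return abs(nums[i_a] - nums[i_b])
-- ===== Notes on version B (the rewrite author's own statement) =====
-- stated objective: simpler
-- what changed: B drops the partition loop and the two auxiliary lists entirely: after sorting it computes the two median positions in closed form and indexes the sorted list directly.
import Mathlib
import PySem

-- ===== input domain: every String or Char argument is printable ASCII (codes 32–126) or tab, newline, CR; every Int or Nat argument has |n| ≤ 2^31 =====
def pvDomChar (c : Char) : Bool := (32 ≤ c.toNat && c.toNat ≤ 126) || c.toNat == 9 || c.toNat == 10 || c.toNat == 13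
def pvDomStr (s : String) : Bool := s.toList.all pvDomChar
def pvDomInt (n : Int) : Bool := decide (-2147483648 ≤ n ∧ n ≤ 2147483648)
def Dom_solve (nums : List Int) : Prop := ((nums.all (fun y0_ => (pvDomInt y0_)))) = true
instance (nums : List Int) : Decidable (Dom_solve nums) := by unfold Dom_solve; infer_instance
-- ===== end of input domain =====

-- B replaces A's partition loop and two auxiliary lists with closed-form indexing
-- into the sorted list (objective: simpler). Like A, the Python B sorts nums in place;
-- the equivalence proved here is about the return value.

-- ===== PORT A =====
def solve (nums : List Int) : Int :=
  let s := PySem.List.sorted nums (fun x => x) false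
  let p := (PySem.List.pyRange 0 (s.length : Int) 1).foldl
    (fun (p : List Int × List Int) i =>
      if PySem.Int.mod i 2 == 0 then (p.1 ++ [PySem.List.pyGetD s i 0], p.2)
      else (p.1, p.2 ++ [PySem.List.pyGetD s i 0])) ([], [])
  let medianAIndex : Nat := p.1.length / 2
  let medianBIndex : Nat := p.2.length / 2
  |PySem.List.pyGetD p.1 (medianAIndex : Int) 0 - PySem.List.pyGetD p.2 (medianBIndex : Int) 0|

-- ===== PORT B =====
def solve_alt (nums : List Int) : Int :=
  let s := PySem.List.sorted nums (fun x => x) false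
  let n := s.length
  let ia : Nat := 2 * (((n + 1) / 2) / 2)
  let ib : Nat := 2 * ((n / 2) / 2) + 1
  |PySem.List.pyGetD s (ia : Int) 0 - PySem.List.pyGetD s (ib : Int) 0|

-- ===== PRECONDITION & SPEC =====
-- Both A and B raise IndexError on lists of fewer than two elements; Pre_ excludes exactly those.
def Pre_solve (nums : List Int) : Prop := 2 ≤ nums.length
instance (nums : List Int) : Decidable (Pre_solve nums) := by unfold Pre_solve; infer_instance
def pvWitness_solve : List Int := [3, 1, 4, 1, 5]

def Spec_solve (nums : List Int) (out : Int) : Prop := out = solve_alt nums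
instance (nums : List Int) (out : Int) : Decidable (Spec_solve nums out) := by unfold Spec_solve; infer_instance

-- ===== CLAIM (what is proved, stated in full; the proofs are below) =====
def Claim_equal_solve : Prop := ∀ (nums : List Int), Dom_solve nums → Pre_solve nums → Spec_solve nums (solve nums)

-- ===== LEMMAS AND PROOFS =====

-- elements of a list at even positions
def evens : List Int → List Int
  | [] => []
  | [a] => [a]
  | a :: _ :: t => a :: evens t

-- elements of a list at odd positions
def odds : List Int → List Int
  | [] => []
  | [_] => []
  | _ :: b :: t => b :: odds t

lemma length_evens (l : List Int) : (evens l).length = (l.length + 1) / 2 := by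
  induction l using evens.induct with
  | case1 => simp [evens]
  | case2 a => simp [evens]
  | case3 a b t ih => simp [evens, ih]; omega

lemma length_odds (l : List Int) : (odds l).length = l.length / 2 := by
  induction l using odds.induct with
  | case1 => simp [odds]
  | case2 a => simp [odds]
  | case3 a b t ih => simp [odds, ih]; omega

lemma getElem?_evens (l : List Int) (k : Nat) : (evens l)[k]? = l[2 * k]? := by
  induction l using evens.induct generalizing k with
  | case1 => simp [evens]
  | case2 a => cases k <;> simp [evens]
  | case3 a b t ih =>
    cases k with
    | zero => simp [evens]
    | succ k =>
      have h2 : 2 * (k + 1) = 2 * k + 1 + 1 := by ring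
      simp [evens, h2, ih]

lemma getElem?_odds (l : List Int) (k : Nat) : (odds l)[k]? = l[2 * k + 1]? := by
  induction l using odds.induct generalizing k with
  | case1 => simp [odds]
  | case2 a => cases k <;> simp [odds]
  | case3 a b t ih =>
    cases k with
    | zero => simp [odds]
    | succ k =>
      have h2 : 2 * (k + 1) + 1 = (2 * k + 1) + 1 + 1 := by ring
      simp [odds, h2, ih]

lemma evens_append_singleton (l : List Int) (x : Int) :
    evens (l ++ [x]) = if l.length % 2 = 0 then evens l ++ [x] else evens l := by
  induction l using evens.induct with
  | case1 => simp [evens]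
  | case2 a => simp [evens]
  | case3 a b t ih =>
    have : (a :: b :: t).length % 2 = t.length % 2 := by simp; omega
    simp only [List.cons_append, evens, ih, this]
    split <;> simp

lemma odds_append_singleton (l : List Int) (x : Int) :
    odds (l ++ [x]) = if l.length % 2 = 0 then odds l else odds l ++ [x] := by
  induction l using odds.induct with
  | case1 => simp [odds]
  | case2 a => simp [odds]
  | case3 a b t ih =>
    have : (a :: b :: t).length % 2 = t.length % 2 := by simp; omega
    simp only [List.cons_append, odds, ih, this]
    split <;> simp

lemma fold_evens_odds (s : List Int) (n : Nat) (hn : n ≤ s.length) :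
    (PySem.List.pyRange 0 (n : Int) 1).foldl
      (fun (p : List Int × List Int) i =>
        if PySem.Int.mod i 2 == 0 then (p.1 ++ [PySem.List.pyGetD s i 0], p.2)
        else (p.1, p.2 ++ [PySem.List.pyGetD s i 0])) ([], [])
    = (evens (s.take n), odds (s.take n)) := by
  induction n with
  | zero => simp [PySem.List.pyRange_one_eq_nil, evens, odds]
  | succ n ih =>
    have hcast : ((n + 1 : Nat) : Int) = (n : Int) + 1 := by push_cast; ring
    rw [hcast, PySem.List.pyRange_one_succ_right (by positivity), List.foldl_append,
        ih (by omega)]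
    have hlt : n < s.length := by omega
    have hg : PySem.List.pyGetD s (n : Int) 0 = s[n] := by
      rw [PySem.List.pyGetD_natCast]; simp [List.getD, hlt]
    have htake : s.take (n + 1) = s.take n ++ [s[n]] := by
      rw [List.take_add_one]; simp [hlt]
    have hmod : PySem.Int.mod (n : Int) 2 = ((n % 2 : Nat) : Int) := by
      rw [PySem.Int.mod_eq_emod_of_pos (by omega)]; omega
    have hlen : (s.take n).length = n := by simp [hlt.le]
    simp only [List.foldl_cons, List.foldl_nil, hg, hmod, htake,
      evens_append_singleton, odds_append_singleton, hlen]
    by_cases h : n % 2 = 0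
    · simp [h]
    · simp [h]
      omega

lemma solve_eq_alt (nums : List Int) : solve nums = solve_alt nums := by
  unfold solve solve_alt
  dsimp only
  set s := PySem.List.sorted nums (fun x => x) false with hs
  rw [fold_evens_odds s s.length le_rfl, List.take_length]
  simp only [length_evens, length_odds, PySem.List.pyGetD_natCast]
  have ha : (evens s).getD ((s.length + 1) / 2 / 2) 0
      = s.getD (2 * ((s.length + 1) / 2 / 2)) 0 := by
    simp only [List.getD, getElem?_evens]
  have hb : (odds s).getD (s.length / 2 / 2) 0
      = s.getD (2 * (s.length / 2 / 2) + 1) 0 := by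
    simp only [List.getD, getElem?_odds]
  rw [ha, hb]

-- ===== VERDICT (by name: the statement is the Claim_ definition above) =====
theorem solve_spec : Claim_equal_solve := by
  intro nums _ _
  unfold Spec_solve
  exact solve_eq_alt nums
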